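-- pv_equiv track=rewrite | github.com/debdattasarkar/DSA | 2. GFG/0. All/1. Arrays/(B) Replace all 0's with 5/py_sol.py | convertFive
-- ===== SOURCE A (Python) =====
-- def convertFive(n):
--     # Code here
--     if n == 0:
--         return 5
--
--     result = 0
--     place = 1
--
--     while n > 0:
--         digit = n % 10
--         if digit == 0:
--             digit = 5
--         result += digit * place
--         place *= 10
--         n //= 10
--
--     return result
-- ===== SOURCE B (Python) =====
-- def convertFive(n):
--     result = 0
--     for c in str(n):
--         result = 10 * result + (5 if c == '0' else ord(c) - 48)
--     return result
-- ===== Notes on version B (the rewrite author's own statement) =====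
-- stated objective: simpler
-- what changed: Replaces the modulo/integer-division place-value loop (with its special zero-input return) by a single most-significant-first fold over the decimal string of n, mapping the character '0' to the digit 5.
-- outside the precondition, e.g. on convertFive(-10): A returns 0, B returns -285; on convertFive(-7): A returns 0, B returns -23
import Mathlib
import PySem

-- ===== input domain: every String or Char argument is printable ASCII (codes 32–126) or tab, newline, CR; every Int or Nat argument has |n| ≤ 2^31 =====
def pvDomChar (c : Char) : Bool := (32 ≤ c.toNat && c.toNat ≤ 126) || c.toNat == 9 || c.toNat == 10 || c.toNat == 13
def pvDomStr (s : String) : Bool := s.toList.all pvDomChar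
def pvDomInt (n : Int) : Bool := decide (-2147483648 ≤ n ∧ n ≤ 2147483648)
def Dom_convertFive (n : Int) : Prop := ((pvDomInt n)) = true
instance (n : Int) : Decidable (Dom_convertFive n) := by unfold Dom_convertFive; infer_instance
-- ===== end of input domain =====

-- B replaces A's modulo/integer-division place-value loop (and its special n==0 return) by one
-- most-significant-first fold over the decimal string of n ('0' contributes 5): simpler, same cost.

-- ===== PORT A =====
-- the while-loop of A: state (n, result, place)
def convertFiveLoop (n result place : Int) : Int :=
  if 0 < n then
    let digit := PySem.Int.mod n 10
    let digit := if digit = 0 then 5 else digit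
    convertFiveLoop (PySem.Int.floordiv n 10) (result + digit * place) (place * 10)
  else result
termination_by n.toNat
decreasing_by
  rw [PySem.Int.floordiv_eq_ediv_of_pos (by norm_num : (0:Int) < 10)]
  omega

def convertFive (n : Int) : Int :=
  if n = 0 then 5 else convertFiveLoop n 0 1

-- ===== PORT B =====
-- one step of B's fold: result = 10*result + (5 if c == '0' else ord(c) - 48)
def convertFiveStep (r : Int) (c : Char) : Int :=
  10 * r + (if c = '0' then 5 else (c.toNat : Int) - 48)

def convertFive_alt (n : Int) : Int :=
  (PySem.Int.toChars n).foldl convertFiveStep 0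

-- ===== PRECONDITION & SPEC =====
-- Pre_ excludes negative n, outside the task's natural domain of decimal digit
-- replacement: there A's while-loop never runs (it returns 0) and B folds over the
-- sign character as well — neither value is a specified behaviour of the task.
def Pre_convertFive (n : Int) : Prop := 0 ≤ n
instance (n : Int) : Decidable (Pre_convertFive n) := by unfold Pre_convertFive; infer_instance
def pvWitness_convertFive : Int := (1050)

def Spec_convertFive (n : Int) (out : Int) : Prop := out = convertFive_alt n
instance (n : Int) (out : Int) : Decidable (Spec_convertFive n out) := by unfold Spec_convertFive; infer_instance

-- ===== CLAIM (what is proved, stated in full; the proofs are below) =====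
def Claim_equal_convertFive : Prop := ∀ (n : Int), Dom_convertFive n → Pre_convertFive n → Spec_convertFive n (convertFive n)

-- ===== LEMMAS AND PROOFS =====

-- value of the digit string of m with every 0-digit replaced by 5 (LSB recursion)
def wDigits (m : Nat) : Int :=
  if m = 0 then 0
  else (if m % 10 = 0 then 5 else ((m % 10 : Nat) : Int)) + 10 * wDigits (m / 10)
termination_by m
decreasing_by omega

-- B's fold after consuming the digit string of m (MSB first), from accumulator r
def hFold (r : Int) (m : Nat) : Int :=
  if m < 10 then convertFiveStep r (Nat.digitChar m)
  else convertFiveStep (hFold r (m / 10)) (Nat.digitChar (m % 10))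
termination_by m
decreasing_by omega

theorem wDigits_zero : wDigits 0 = 0 := by rw [wDigits]; rfl

theorem wDigits_pos (m : Nat) (h : 0 < m) :
    wDigits m = (if m % 10 = 0 then 5 else ((m % 10 : Nat) : Int)) + 10 * wDigits (m / 10) := by
  rw [wDigits, if_neg (by omega)]

theorem hFold_lt (r : Int) (m : Nat) (h : m < 10) :
    hFold r m = convertFiveStep r (Nat.digitChar m) := by
  rw [hFold, if_pos h]

theorem hFold_ge (r : Int) (m : Nat) (h : ¬ m < 10) :
    hFold r m = convertFiveStep (hFold r (m / 10)) (Nat.digitChar (m % 10)) := by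
  rw [hFold, if_neg h]

theorem step_digitChar (r : Int) (d : Nat) (hd : d < 10) :
    convertFiveStep r (Nat.digitChar d) = 10 * r + (if d = 0 then 5 else (d : Int)) := by
  interval_cases d <;> simp [convertFiveStep, Nat.digitChar]

theorem loop_eq (m : Nat) (hm : 0 < m) : ∀ r p : Int,
    convertFiveLoop (m : Int) r p = r + p * wDigits m := by
  induction m using Nat.strong_induction_on with
  | _ m ih =>
    intro r p
    have hmod : PySem.Int.mod (m : Int) 10 = ((m % 10 : Nat) : Int) := by
      exact_mod_cast PySem.Int.mod_natCast m 10
    have hdiv : PySem.Int.floordiv (m : Int) 10 = ((m / 10 : Nat) : Int) := by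
      exact_mod_cast PySem.Int.floordiv_natCast m 10
    rw [convertFiveLoop]
    simp only [show (0:Int) < (m:Int) from by exact_mod_cast hm, if_pos]
    rw [hmod, hdiv]
    by_cases hq : m / 10 = 0
    · rw [hq]
      rw [convertFiveLoop]
      simp only [Int.natCast_zero, lt_self_iff_false, if_false]
      rw [wDigits_pos m hm, hq, wDigits_zero]
      by_cases h0 : m % 10 = 0 <;> simp only [h0, Nat.cast_eq_zero, Nat.cast_zero,
        if_true, if_false] <;> ring
    · rw [ih (m / 10) (by omega) (by omega)]
      rw [wDigits_pos m hm]
      by_cases h0 : m % 10 = 0 <;> simp only [h0, Nat.cast_eq_zero, Nat.cast_zero,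
        if_true, if_false] <;> ring

theorem foldl_tdc : ∀ (fuel n : Nat), n < fuel → ∀ (ds : List Char) (r : Int),
    (Nat.toDigitsCore 10 fuel n ds).foldl convertFiveStep r
      = ds.foldl convertFiveStep (hFold r n) := by
  intro fuel
  induction fuel with
  | zero => intro n h; omega
  | succ f ih =>
    intro n h ds r
    rw [Nat.toDigitsCore]
    by_cases hq : n / 10 = 0
    · simp only [hq, if_pos]
      rw [List.foldl_cons, hFold_lt r n (by omega)]
      have hn : n % 10 = n := by omega
      rw [hn]
    · simp only [hq, if_false]
      have hf : n / 10 < f := by omega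
      rw [ih (n / 10) hf, List.foldl_cons, hFold_ge r n (by omega)]

theorem hFold_eq (m : Nat) (hm : 0 < m) : ∀ r : Int,
    hFold r m = r * 10 ^ (Nat.log 10 m + 1) + wDigits m := by
  induction m using Nat.strong_induction_on with
  | _ m ih =>
    intro r
    by_cases hlt : m < 10
    · rw [hFold_lt r m hlt, step_digitChar r m hlt, if_neg (by omega)]
      rw [Nat.log_eq_zero_iff.mpr (Or.inl hlt), wDigits_pos m hm,
        Nat.mod_eq_of_lt hlt, Nat.div_eq_of_lt hlt, wDigits_zero, if_neg (by omega)]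
      ring
    · have hlog : Nat.log 10 m = Nat.log 10 (m / 10) + 1 := by
        have h1 := Nat.log_div_base 10 m
        have h2 : 0 < Nat.log 10 m := Nat.log_pos (by norm_num) (by omega)
        omega
      rw [hFold_ge r m hlt, step_digitChar _ (m % 10) (by omega),
        ih (m / 10) (by omega) (by omega), hlog, wDigits_pos m hm]
      by_cases h0 : m % 10 = 0 <;> simp only [h0, if_true, if_false] <;> ring

theorem alt_eq_hFold (m : Nat) : convertFive_alt (m : Int) = hFold 0 m := by
  unfold convertFive_alt
  rw [PySem.Int.toChars]
  simp only [show ¬ ((m:Int) < 0) from by omega, if_false]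
  rw [show ((m:Int).toNat) = m from by omega]
  rw [Nat.toDigits, foldl_tdc (m + 1) m (by omega) [] 0, List.foldl_nil]

-- ===== VERDICT (by name: the statement is the Claim_ definition above) =====
theorem convertFive_spec : Claim_equal_convertFive := by
  intro n _ hpre
  unfold Pre_convertFive at hpre
  unfold Spec_convertFive convertFive
  obtain ⟨m, rfl⟩ : ∃ m : Nat, n = (m : Int) := ⟨n.toNat, by omega⟩
  by_cases h0 : m = 0
  · subst h0; decide
  · rw [if_neg (by exact_mod_cast h0)]
    rw [loop_eq m (by omega) 0 1, alt_eq_hFold m, hFold_eq m (by omega) 0]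
    ring
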